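-- pv_equiv track=rewrite | github.com/developer388/Pattern-wise-coding-problems | Subsequence/question02.py | solution
-- ===== SOURCE A (Python) =====
-- def solution(input_array, subarray_sum, result, i):
--
-- 	if i == len(input_array):
-- 		result.append(subarray_sum)
-- 		return
--
-- 	subarray_sum += input_array[i]
-- 	solution(input_array, subarray_sum, result, i+1)
--
-- 	subarray_sum -= input_array[i]
-- 	solution(input_array, subarray_sum, result, i+1)
--
-- 	return result
-- ===== SOURCE B (Python) =====
-- def solution(input_array, subarray_sum, result, i):
--     # Iterative DFS over an explicit stack of (index, running_sum) states.
--     # Mutates `result` in place like the original; returns `result`.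
--     n = len(input_array)
--     stack = [(i, subarray_sum)]
--     while stack:
--         j, s = stack.pop()
--         if j == n:
--             result.append(s)
--         else:
--             inc = s + input_array[j]
--             exc = inc - input_array[j]
--             stack.append((j + 1, exc))
--             stack.append((j + 1, inc))
--     return result
-- ===== Notes on version B (the rewrite author's own statement) =====
-- stated objective: alternative
-- what changed: Replaced the binary recursion with an iterative depth-first traversal over an explicit stack of (index, running_sum) states, pushing the exclude branch below the include branch to keep the include-first leaf order.
-- outside the precondition, e.g. on solution([], 0, [], 0): A returns None, B returns [0]; on solution([1], 0, [], 1): A returns None, B returns [0]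
import Mathlib
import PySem

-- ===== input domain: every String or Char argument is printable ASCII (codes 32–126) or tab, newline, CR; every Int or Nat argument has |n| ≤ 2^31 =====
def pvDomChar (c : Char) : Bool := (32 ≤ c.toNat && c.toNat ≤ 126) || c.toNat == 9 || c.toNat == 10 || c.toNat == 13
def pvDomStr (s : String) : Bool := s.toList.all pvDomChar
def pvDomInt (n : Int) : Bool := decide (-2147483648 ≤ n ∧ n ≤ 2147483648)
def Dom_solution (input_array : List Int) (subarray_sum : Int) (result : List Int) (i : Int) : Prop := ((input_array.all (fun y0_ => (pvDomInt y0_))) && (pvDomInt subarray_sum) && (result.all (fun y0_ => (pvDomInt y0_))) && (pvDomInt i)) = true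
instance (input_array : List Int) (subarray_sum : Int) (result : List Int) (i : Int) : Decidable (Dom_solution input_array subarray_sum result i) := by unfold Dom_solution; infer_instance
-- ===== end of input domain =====

-- A mutates `result` in place; the equivalence proved here is about the RETURN
-- value (B performs the same mutation in Python). B replaces the binary
-- recursion by an iterative DFS over an explicit stack of (index, sum) states.

-- ===== PORT A =====
-- Literal port of A's recursion; the mutated `result` list is threaded through.
-- In the base case Python A returns None (excluded by Pre_); the port returns
-- the appended list there.
def solution (input_array : List Int) (subarray_sum : Int) (result : List Int) (i : Int) : List Int :=
  if i = (input_array.length : Int) then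
    result ++ [subarray_sum]
  else
    match h : PySem.List.pyGet? input_array i with
    | none => result   -- Python raises IndexError here (outside Pre_)
    | some x =>
      let r1 := solution input_array (subarray_sum + x) result (i + 1)
      let r2 := solution input_array (subarray_sum + x - x) r1 (i + 1)
      r2
termination_by ((input_array.length : Int) - i).toNat
decreasing_by
  all_goals
    have hin : PySem.Raise.InRange input_array.length i := by
      by_contra hc
      rw [← PySem.List.pyGet?_eq_none_iff (xs := input_array)] at hc
      simp [hc] at h
    have := hin.2
    omega

-- ===== PORT B =====
-- Stack loop of Source B: pop (j,s); at j = len append s, else push (j+1, exc)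
-- below (j+1, inc).  The `none` index case (IndexError in Python, outside
-- Pre_) skips the state.
def solLoop (input_array : List Int) (stack : List (Int × Int)) (result : List Int) : List Int :=
  match stack with
  | [] => result
  | (j, s) :: rest =>
    if j = (input_array.length : Int) then
      solLoop input_array rest (result ++ [s])
    else
      match h : PySem.List.pyGet? input_array j with
      | none => solLoop input_array rest result
      | some x =>
        let inc := s + x
        let exc := inc - x
        solLoop input_array ((j + 1, inc) :: (j + 1, exc) :: rest) result
termination_by ((stack.map (fun p => 3 ^ (((input_array.length : Int) - p.1).toNat + 1))).sum)
decreasing_by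
  · simp only [List.map_cons, List.sum_cons]
    have hpos : 0 < (3:ℕ) ^ ((((input_array.length : Int) - j).toNat) + 1) := Nat.pow_pos (by norm_num)
    omega
  · simp only [List.map_cons, List.sum_cons]
    have hpos : 0 < (3:ℕ) ^ ((((input_array.length : Int) - j).toNat) + 1) := Nat.pow_pos (by norm_num)
    omega
  · have hin : PySem.Raise.InRange input_array.length j := by
      by_contra hc
      rw [← PySem.List.pyGet?_eq_none_iff (xs := input_array)] at hc
      simp [hc] at h
    have hj : j < (input_array.length : Int) := hin.2
    have hk : (((input_array.length : Int) - j).toNat) = (((input_array.length : Int) - (j+1)).toNat) + 1 := by omega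
    simp only [List.map_cons, List.sum_cons, hk]
    have hpos : 0 < (3:ℕ) ^ ((((input_array.length : Int) - (j+1)).toNat) + 1) :=
      Nat.pow_pos (by norm_num)
    omega

def solution_alt (input_array : List Int) (subarray_sum : Int) (result : List Int) (i : Int) : List Int :=
  solLoop input_array [(i, subarray_sum)] result

-- ===== PRECONDITION & SPEC =====
-- Pre_ excludes i = len(input_array) (A's base case returns None, not a list;
-- B naturally returns the appended list) and out-of-range i, where A raises
-- IndexError.
def Pre_solution (input_array : List Int) (subarray_sum : Int) (result : List Int) (i : Int) : Prop :=
  -(input_array.length : Int) ≤ i ∧ i < (input_array.length : Int)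
instance (input_array : List Int) (subarray_sum : Int) (result : List Int) (i : Int) : Decidable (Pre_solution input_array subarray_sum result i) := by unfold Pre_solution; infer_instance

def pvWitness_solution : List Int × Int × List Int × Int := ([1, 2], 0, [], 0)

def Spec_solution (input_array : List Int) (subarray_sum : Int) (result : List Int) (i : Int) (out : List Int) : Prop := out = solution_alt input_array subarray_sum result i
instance (input_array : List Int) (subarray_sum : Int) (result : List Int) (i : Int) (out : List Int) : Decidable (Spec_solution input_array subarray_sum result i out) := by unfold Spec_solution; infer_instance

-- ===== CLAIM (what is proved, stated in full; the proofs are below) =====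
def Claim_equal_solution : Prop := ∀ (input_array : List Int) (subarray_sum : Int) (result : List Int) (i : Int), Dom_solution input_array subarray_sum result i → Pre_solution input_array subarray_sum result i → Spec_solution input_array subarray_sum result i (solution input_array subarray_sum result i)

-- ===== LEMMAS AND PROOFS =====

-- Processing the top stack state is exactly A's recursive call on that state.
theorem solLoop_cons (input_array : List Int) :
    ∀ (k : Nat) (j s : Int) (rest : List (Int × Int)) (result : List Int),
      (((input_array.length : Int) - j).toNat) = k →
      solLoop input_array ((j, s) :: rest) result
        = solLoop input_array rest (solution input_array s result j) := by
  intro k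
  induction k using Nat.strong_induction_on with
  | _ k ih =>
    intro j s rest result hk
    rw [solLoop, solution]
    by_cases hbase : j = (input_array.length : Int)
    · simp [hbase]
    · simp only [hbase, if_false]
      cases h : PySem.List.pyGet? input_array j with
      | none => rfl
      | some x =>
        have hin : PySem.Raise.InRange input_array.length j := by
          by_contra hc
          rw [← PySem.List.pyGet?_eq_none_iff (xs := input_array)] at hc
          simp [hc] at h
        have hj : j < (input_array.length : Int) := hin.2
        have hk1 : (((input_array.length : Int) - (j + 1)).toNat) < k := by omega
        show solLoop input_array ((j + 1, s + x) :: (j + 1, s + x - x) :: rest) result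
          = solLoop input_array rest
              (solution input_array (s + x - x) (solution input_array (s + x) result (j + 1)) (j + 1))
        rw [ih _ hk1 (j + 1) (s + x) _ _ rfl,
            ih _ hk1 (j + 1) (s + x - x) rest _ rfl]

theorem solution_spec : Claim_equal_solution := by
  intro input_array subarray_sum result i _ _
  unfold Spec_solution solution_alt
  rw [solLoop_cons input_array (((input_array.length : Int) - i).toNat) i subarray_sum [] result rfl]
  rw [solLoop]
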